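-- pv_equiv track=rewrite | github.com/Zephyrsz/CryptoMonitor | faustTest/monitor_server.py | kudu_status_handle
-- ===== SOURCE A (Python) =====
-- def kudu_status_handle(sshRes=[]):
--     status = 'unknown'
--     for msg in sshRes:
--         if 'running[  OK  ]' in msg:
--             status = 'health'
--         if 'running[FAILED]' in msg:
--             status = 'bad'
--     return status
-- ===== SOURCE B (Python) =====
-- def kudu_status_handle(sshRes=[]):
--     for msg in reversed(sshRes):
--         if 'running[FAILED]' in msg:
--             return 'bad'
--         if 'running[  OK  ]' in msg:
--             return 'health'
--     return 'unknown'
-- ===== Notes on version B (the rewrite author's own statement) =====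
-- stated objective: alternative
-- what changed: Replaces the forward full-accumulation pass over all messages with a reverse early-exit search that returns at the latest message containing a status marker (FAILED checked before OK to keep last-check-wins precedence).
import Mathlib
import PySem

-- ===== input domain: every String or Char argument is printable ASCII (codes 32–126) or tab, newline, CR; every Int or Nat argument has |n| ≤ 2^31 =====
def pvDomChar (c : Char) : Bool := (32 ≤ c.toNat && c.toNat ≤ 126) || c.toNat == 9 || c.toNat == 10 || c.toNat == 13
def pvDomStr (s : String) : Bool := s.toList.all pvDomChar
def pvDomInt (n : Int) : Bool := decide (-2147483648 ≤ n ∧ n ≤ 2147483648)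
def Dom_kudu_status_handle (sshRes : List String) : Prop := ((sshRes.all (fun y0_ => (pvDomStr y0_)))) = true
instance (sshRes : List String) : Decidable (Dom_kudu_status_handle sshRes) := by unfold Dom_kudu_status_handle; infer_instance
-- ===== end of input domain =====

-- B replaces A's forward accumulate-over-all-messages pass with a reverse early-exit
-- search for the latest status-bearing message (alternative decomposition, same result).

-- ===== PORT A =====
-- A's loop: status accumulator updated by every message, OK checked first, FAILED second.
def kudu_status_handle (sshRes : List String) : String :=
  sshRes.foldl
    (fun status msg =>
      let status1 := if PySem.Str.isIn "running[  OK  ]" msg then "health" else status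
      if PySem.Str.isIn "running[FAILED]" msg then "bad" else status1)
    "unknown"

-- ===== PORT B =====
-- B's loop: scan reversed(sshRes), return at the first matching message (FAILED first).
def kuduAltGo : List String → String
  | [] => "unknown"
  | msg :: rest =>
    if PySem.Str.isIn "running[FAILED]" msg then "bad"
    else if PySem.Str.isIn "running[  OK  ]" msg then "health"
    else kuduAltGo rest

def kudu_status_handle_alt (sshRes : List String) : String :=
  kuduAltGo sshRes.reverse

-- ===== PRECONDITION & SPEC =====
def Spec_kudu_status_handle (sshRes : List String) (out : String) : Prop := out = kudu_status_handle_alt sshRes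
instance (sshRes : List String) (out : String) : Decidable (Spec_kudu_status_handle sshRes out) := by unfold Spec_kudu_status_handle; infer_instance

-- ===== CLAIM (what is proved, stated in full; the proofs are below) =====
def Claim_equal_kudu_status_handle : Prop := ∀ (sshRes : List String), Dom_kudu_status_handle sshRes → Spec_kudu_status_handle sshRes (kudu_status_handle sshRes)

-- ===== LEMMAS AND PROOFS =====

-- A's per-message update function, named for the proofs.
def kuduUpd (status msg : String) : String :=
  let status1 := if PySem.Str.isIn "running[  OK  ]" msg then "health" else status
  if PySem.Str.isIn "running[FAILED]" msg then "bad" else status1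

-- B's scan generalized over the no-match default.
def kuduGoD : List String → String → String
  | [], s => s
  | msg :: rest, s =>
    if PySem.Str.isIn "running[FAILED]" msg then "bad"
    else if PySem.Str.isIn "running[  OK  ]" msg then "health"
    else kuduGoD rest s

theorem kuduAltGo_eq_goD (l : List String) : kuduAltGo l = kuduGoD l "unknown" := by
  induction l with
  | nil => rfl
  | cons m t ih => simp only [kuduAltGo, kuduGoD, ih]

theorem kuduGoD_append (t : List String) (m s : String) :
    kuduGoD (t ++ [m]) s = kuduGoD t (kuduUpd s m) := by
  induction t generalizing s with
  | nil => simp [kuduGoD, kuduUpd]; split_ifs <;> rfl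
  | cons x r ih => simp only [List.cons_append, kuduGoD, ih]

theorem kudu_foldl_eq_goD (l : List String) (s : String) :
    l.foldl kuduUpd s = kuduGoD l.reverse s := by
  induction l generalizing s with
  | nil => rfl
  | cons m t ih =>
    simp only [List.foldl_cons, List.reverse_cons, ih, kuduGoD_append]

-- ===== VERDICT (by name: the statement is the Claim_ definition above) =====
theorem kudu_status_handle_spec : Claim_equal_kudu_status_handle := by
  intro sshRes _
  unfold Spec_kudu_status_handle kudu_status_handle kudu_status_handle_alt
  rw [kuduAltGo_eq_goD, ← kudu_foldl_eq_goD]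
  rfl
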